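-- pv_equiv track=rewrite | github.com/paulohsilvapinto/advent-of-code | commons/utils.py | get_matrixes_from_input
-- ===== SOURCE A (Python) =====
-- def get_matrixes_from_input(input_data):
--     matrixes = []
--
--     matrix_builder = []
--     for row in input_data:
--         if row:
--             matrix_builder.append([val for val in row])
--         else:
--             matrixes.append(matrix_builder)
--             matrix_builder = []
--
--     if matrix_builder:
--         matrixes.append(matrix_builder)
--
--     return matrixes
-- ===== SOURCE B (Python) =====
-- def _segments(rows):
--     # split the row list at blank rows using index+slice recursion
--     if "" in rows:
--         i = rows.index("")
--         return [rows[:i]] + _segments(rows[i + 1:])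
--     return [rows]
--
--
-- def get_matrixes_from_input(input_data):
--     segs = [[list(r) for r in seg] for seg in _segments(list(input_data))]
--     if not segs[-1]:
--         segs.pop()
--     return segs
-- ===== Notes on version B (the rewrite author's own statement) =====
-- stated objective: alternative
-- what changed: Replaces A's single pass with a running matrix-builder flushed at each blank row by an index/slice decomposition: repeatedly locate the next blank row with list.index, cut the row list into segments by slicing, map each segment's rows to character lists in a second pass, and finally drop the trailing segment if it is empty.
import Mathlib
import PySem

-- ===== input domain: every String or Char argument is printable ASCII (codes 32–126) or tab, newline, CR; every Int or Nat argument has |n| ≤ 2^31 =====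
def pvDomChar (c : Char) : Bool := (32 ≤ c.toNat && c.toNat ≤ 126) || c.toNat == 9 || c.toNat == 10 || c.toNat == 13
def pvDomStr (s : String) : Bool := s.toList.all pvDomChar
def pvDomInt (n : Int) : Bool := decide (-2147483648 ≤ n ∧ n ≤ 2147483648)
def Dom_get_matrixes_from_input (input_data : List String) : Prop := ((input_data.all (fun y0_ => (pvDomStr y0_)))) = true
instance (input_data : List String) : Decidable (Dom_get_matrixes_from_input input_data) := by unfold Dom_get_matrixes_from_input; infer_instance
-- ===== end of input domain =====

-- B replaces A's running matrix-builder flushed at each blank row by an index/slice split: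
-- cut the row list at blank rows, map each segment, then drop a trailing empty segment (objective: alternative).

-- [val for val in row] / list(row): the row's characters as one-character strings (used by both ports)
def pvChars (r : String) : List String := r.toList.map (fun c => String.ofList [c])

-- ===== PORT A =====
def get_matrixes_from_input (input_data : List String) : List (List (List String)) :=
  let st := input_data.foldl
    (fun (st : List (List (List String)) × List (List String)) row =>
      if row ≠ "" then (st.1, st.2 ++ [pvChars row])
      else (st.1 ++ [st.2], []))
    ([], [])
  if st.2 ≠ [] then st.1 ++ [st.2] else st.1

-- ===== PORT B =====
-- the `while "" in rest: i = rest.index(""); …` loop of Source B's _segments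
-- (the membership test and rest.index together are PySem.List.index?: some i ↔ "" ∈ rest)
def pvSegLoop (segs : List (List String)) (rest : List String) : List (List String) :=
  match h : PySem.List.index? rest "" with
  | some i =>
      pvSegLoop (segs ++ [PySem.List.slice rest none (some (i : Int))])
        (PySem.List.slice rest (some ((i : Int) + 1)) none)
  | none => segs ++ [rest]
termination_by rest.length
decreasing_by
  obtain ⟨hk, -, -⟩ := PySem.List.getElem_of_index?_eq_some h
  have hs : PySem.List.slice rest (some ((i : Int) + 1)) none = rest.drop (i + 1) := by
    have := PySem.List.slice_from_natCast rest (i + 1)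
    simpa using this
  rw [hs]
  simp only [List.length_drop]
  omega

def get_matrixes_from_input_alt (input_data : List String) : List (List (List String)) :=
  let segs := (pvSegLoop [] input_data).map (fun seg => seg.map pvChars)
  -- if not segs[-1]: segs.pop()   (segs is provably nonempty, so segs[-1] never raises)
  if segs.getLastD [] = [] then segs.dropLast else segs

-- ===== PRECONDITION & SPEC =====
def Spec_get_matrixes_from_input (input_data : List String) (out : List (List (List String))) : Prop := out = get_matrixes_from_input_alt input_data
instance (input_data : List String) (out : List (List (List String))) : Decidable (Spec_get_matrixes_from_input input_data out) := by unfold Spec_get_matrixes_from_input; infer_instance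

-- ===== CLAIM (what is proved, stated in full; the proofs are below) =====
def Claim_equal_get_matrixes_from_input : Prop := ∀ (input_data : List String), Dom_get_matrixes_from_input input_data → Spec_get_matrixes_from_input input_data (get_matrixes_from_input input_data)

-- ===== LEMMAS AND PROOFS =====

-- reference splitting: segments of char-matrices, structural recursion on the rows
def csegs : List String → List (List (List String))
  | [] => [[]]
  | r :: rest =>
      if r = "" then [] :: csegs rest
      else
        match csegs rest with
        | s :: ss => (pvChars r :: s) :: ss
        | [] => [[pvChars r]]

theorem csegs_ne_nil (rows : List String) : csegs rows ≠ [] := by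
  cases rows with
  | nil => simp [csegs]
  | cons r rest =>
      simp only [csegs]
      split_ifs
      · simp
      · cases h : csegs rest <;> simp

-- string-level segments, structural recursion
def ssegs : List String → List (List String)
  | [] => [[]]
  | r :: rest =>
      if r = "" then [] :: ssegs rest
      else
        match ssegs rest with
        | s :: ss => (r :: s) :: ss
        | [] => [[r]]

theorem ssegs_ne_nil (rows : List String) : ssegs rows ≠ [] := by
  cases rows with
  | nil => simp [ssegs]
  | cons r rest =>
      simp only [ssegs]
      split_ifs
      · simp
      · cases h : ssegs rest <;> simp

theorem map_ssegs (rows : List String) :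
    (ssegs rows).map (fun s => s.map pvChars) = csegs rows := by
  induction rows with
  | nil => simp [ssegs, csegs]
  | cons r rest ih =>
      simp only [ssegs, csegs]
      split_ifs with h
      · simpa using ih
      · cases hs : ssegs rest with
        | nil => exact absurd hs (ssegs_ne_nil rest)
        | cons s ss =>
            rw [hs] at ih
            cases hc : csegs rest with
            | nil => exact absurd hc (csegs_ne_nil rest)
            | cons t ts =>
                rw [hc] at ih
                simp only [List.map_cons] at ih ⊢
                obtain ⟨h1, h2⟩ := List.cons.injEq .. ▸ ih
                simp [h1, h2]

theorem ssegs_no_blank (rows : List String) (h : "" ∉ rows) : ssegs rows = [rows] := by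
  induction rows with
  | nil => simp [ssegs]
  | cons r rest ih =>
      simp only [List.mem_cons, not_or] at h
      simp only [ssegs]
      rw [if_neg (by exact fun hr => h.1 hr.symm)]
      rw [ih h.2]

theorem ssegs_split (pre suf : List String) (h : "" ∉ pre) :
    ssegs (pre ++ "" :: suf) = pre :: ssegs suf := by
  induction pre with
  | nil => simp [ssegs]
  | cons p ps ih =>
      simp only [List.mem_cons, not_or] at h
      simp only [List.cons_append, ssegs]
      rw [if_neg (by exact fun hp => h.1 hp.symm), ih h.2]

theorem pvSegLoop_eq (segs : List (List String)) (rest : List String) :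
    pvSegLoop segs rest = segs ++ ssegs rest := by
  induction segs, rest using pvSegLoop.induct with
  | case1 segs rest i h ih =>
      rw [pvSegLoop.eq_def]
      split
      case h_2 h' => rw [h] at h'; cases h'
      case h_1 i' h' =>
      rw [h] at h'
      injection h' with hii
      subst hii
      obtain ⟨pre, suf, hsplit, hlen, hpre⟩ := ((PySem.List.index?_eq_some_iff ..).mp h)
      have h1 : PySem.List.slice rest none (some (i : Int)) = pre := by
        rw [PySem.List.slice_to_natCast, hsplit, ← hlen]
        exact List.take_left ..
      have h2 : PySem.List.slice rest (some ((i : Int) + 1)) none = suf := by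
        have := PySem.List.slice_from_natCast rest (i + 1)
        rw [show ((i : Int) + 1) = ((i + 1 : Nat) : Int) by push_cast; ring, this,
          hsplit, ← hlen]
        rw [show pre ++ "" :: suf = (pre ++ [""]) ++ suf by simp]
        simp [List.drop_left]
      rw [h1, h2] at ih
      rw [h1, h2, ih, hsplit, ssegs_split pre suf hpre]
      simp
  | case2 segs rest h =>
      rw [pvSegLoop.eq_def]
      split
      case h_1 i' h' => rw [h] at h'; cases h'
      case h_2 h' => rw [ssegs_no_blank rest ((PySem.List.index?_eq_none_iff ..).mp h)]

-- head-merge helper for the fold invariant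
def appHead (b : List (List String)) : List (List (List String)) → List (List (List String))
  | [] => [b]
  | s :: ss => (b ++ s) :: ss

theorem foldA_eq (rows : List String) :
    ∀ (M : List (List (List String))) (b : List (List String)),
    rows.foldl
      (fun (st : List (List (List String)) × List (List String)) row =>
        if row ≠ "" then (st.1, st.2 ++ [pvChars row])
        else (st.1 ++ [st.2], []))
      (M, b)
    = (M ++ (appHead b (csegs rows)).dropLast, (appHead b (csegs rows)).getLastD []) := by
  induction rows with
  | nil => intro M b; simp [csegs, appHead]
  | cons r rest ih =>
      intro M b
      simp only [List.foldl_cons]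
      by_cases h : r = ""
      · subst h
        simp only [ne_eq, not_true_eq_false, if_false]
        rw [ih]
        simp only [csegs, appHead]
        have hne := csegs_ne_nil rest
        cases hc : csegs rest with
        | nil => exact absurd hc hne
        | cons t ts =>
            simp [List.dropLast_cons_of_ne_nil]
      · simp only [ne_eq, h, not_false_eq_true, if_true]
        rw [ih]
        simp only [csegs, if_neg h]
        cases hc : csegs rest with
        | nil => exact absurd hc (csegs_ne_nil rest)
        | cons t ts => simp [appHead]

theorem dropLast_getLast (l : List (List (List String))) (h : l ≠ []) :
    l.dropLast ++ [l.getLast?.getD []] = l := by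
  induction l using List.reverseRecOn with
  | nil => exact absurd rfl h
  | append_singleton xs a ih => simp

-- ===== VERDICT (by name: the statement is the Claim_ definition above) =====
theorem get_matrixes_from_input_spec : Claim_equal_get_matrixes_from_input := by
  intro input_data _
  unfold Spec_get_matrixes_from_input get_matrixes_from_input get_matrixes_from_input_alt
  dsimp only
  rw [pvSegLoop_eq [] input_data]
  simp only [List.nil_append, map_ssegs]
  rw [foldA_eq input_data [] []]
  have hC : appHead [] (csegs input_data) = csegs input_data := by
    cases h : csegs input_data with
    | nil => exact absurd h (csegs_ne_nil input_data)
    | cons t ts => simp [appHead]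
  rw [hC]
  by_cases h1 : (csegs input_data).getLast?.getD [] = []
  · simp [h1]
  · simp [h1, dropLast_getLast _ (csegs_ne_nil input_data)]
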